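-- pv_equiv track=rewrite | github.com/AlphaCloudX/Word-Search-Script | Methods.py | methodOne
-- ===== SOURCE A (Python) =====
-- def stringify(diag):
--     text = ""
--     # Turning indices into 1 whole string
--     for y in range(len(diag)):
--         text = text + diag[y]
--
--     return text
--
-- def methodOne(array):
--     board = []
--     positions = []
--     # For top Left to Bottom Right | Top Half
--     for x in range(len(array[0])):
--         diag = stringify([row[i + x] for i, row in enumerate(array) if 0 <= i + x < len(row)])
--         board.append(diag)
--
--         position = [(i + x+1, i+1) for i, row in enumerate(array) if 0 <= i + x < len(row)]
--         positions.append(position)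
--
--     return board, positions
-- ===== SOURCE B (Python) =====
-- def methodOne(array):
--     cols = len(array[0])
--     chars = [[] for _ in range(cols)]
--     positions = [[] for _ in range(cols)]
--     for i, row in enumerate(array):
--         for col in range(len(row)):
--             d = col - i
--             if 0 <= d < cols:
--                 chars[d].append(row[col])
--                 positions[d].append((col + 1, i + 1))
--     return [''.join(b) for b in chars], positions
-- ===== Notes on version B (the rewrite author's own statement) =====
-- stated objective: alternative
-- what changed: A rescans the whole matrix once per diagonal (one comprehension pass per column index); B makes a single row-major pass that scatters each cell into per-diagonal buckets and joins them at the end.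
-- outside the precondition, e.g. on methodOne([]): A raises IndexError, B raises IndexError
import Mathlib
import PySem

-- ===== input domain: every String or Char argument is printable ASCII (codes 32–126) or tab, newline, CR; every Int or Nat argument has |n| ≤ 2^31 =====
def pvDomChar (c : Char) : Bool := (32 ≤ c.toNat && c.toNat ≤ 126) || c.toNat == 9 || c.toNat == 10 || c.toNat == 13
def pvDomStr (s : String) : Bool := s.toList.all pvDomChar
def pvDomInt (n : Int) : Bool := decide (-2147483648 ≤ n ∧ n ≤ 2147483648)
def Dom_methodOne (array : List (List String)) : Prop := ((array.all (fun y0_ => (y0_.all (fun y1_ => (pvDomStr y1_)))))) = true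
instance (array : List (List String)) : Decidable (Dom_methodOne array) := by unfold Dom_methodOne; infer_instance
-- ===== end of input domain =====

-- B replaces A's per-diagonal rescans of the whole matrix by one bucket-filling pass over the rows.

-- ===== PORT A =====
def stringify (diag : List String) : String :=
  (PySem.List.pyRange 0 (PySem.List.len diag)).foldl
    (fun text y => text ++ PySem.List.pyGetD diag y "") ""

def methodOne (array : List (List String)) : List String × (List (List (Int × Int))) :=
  (PySem.List.pyRange 0 (PySem.List.len (PySem.List.pyGetD array 0 []))).foldl
    (fun (st : List String × List (List (Int × Int))) x =>
      let diag := stringify ((PySem.List.enumerate array 0).filterMap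
        (fun p => if 0 ≤ p.1 + x ∧ p.1 + x < PySem.List.len p.2
                  then some (PySem.List.pyGetD p.2 (p.1 + x) "") else none))
      let position := (PySem.List.enumerate array 0).filterMap
        (fun p => if 0 ≤ p.1 + x ∧ p.1 + x < PySem.List.len p.2
                  then some (p.1 + x + 1, p.1 + 1) else none)
      (st.1 ++ [diag], st.2 ++ [position]))
    ([], [])

-- ===== PORT B =====
-- one row of B's single pass: scatter the row's cells into the diagonal buckets
def altRowStep (cols : Int)
    (st : List (List String) × List (List (Int × Int))) (p : Int × List String) :
    List (List String) × List (List (Int × Int)) :=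
  (PySem.List.pyRange 0 (PySem.List.len p.2)).foldl
    (fun st col =>
      let d := col - p.1
      if 0 ≤ d ∧ d < cols then
        (st.1.set d.toNat (st.1.getD d.toNat [] ++ [PySem.List.pyGetD p.2 col ""]),
         st.2.set d.toNat (st.2.getD d.toNat [] ++ [(col + 1, p.1 + 1)]))
      else st) st

def methodOne_alt (array : List (List String)) : List String × (List (List (Int × Int))) :=
  let cols := PySem.List.len (PySem.List.pyGetD array 0 [])
  let st := (PySem.List.enumerate array 0).foldl (altRowStep cols)
    (List.replicate cols.toNat [], List.replicate cols.toNat [])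
  (st.1.map (fun b => PySem.Str.join "" b), st.2)

-- ===== PRECONDITION & SPEC =====
-- Pre_ excludes only the empty matrix, on which Python A raises IndexError at array[0] (B raises there too).
def Pre_methodOne (array : List (List String)) : Prop := array ≠ []
instance (array : List (List String)) : Decidable (Pre_methodOne array) := by unfold Pre_methodOne; infer_instance
def pvWitness_methodOne : List (List String) := [["a", "b"], ["c", "d"]]

def Spec_methodOne (array : List (List String)) (out : List String × (List (List (Int × Int)))) : Prop := out = methodOne_alt array
instance (array : List (List String)) (out : List String × (List (List (Int × Int)))) : Decidable (Spec_methodOne array out) := by unfold Spec_methodOne; infer_instance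

-- ===== CLAIM (what is proved, stated in full; the proofs are below) =====
def Claim_equal_methodOne : Prop := ∀ (array : List (List String)), Dom_methodOne array → Pre_methodOne array → Spec_methodOne array (methodOne array)

-- ===== LEMMAS AND PROOFS =====

lemma chars_join_nil (ps : List (List Char)) : PySem.Chars.join [] ps = ps.flatten := by
  induction ps with
  | nil => simp [PySem.Chars.join_nil]
  | cons a r ih =>
    cases r with
    | nil => simp [PySem.Chars.join, List.intercalate]
    | cons b t => rw [PySem.Chars.join_cons_cons]; simp_all

lemma foldl_append_toList (l : List String) (s : String) :
    (l.foldl (fun a t => a ++ t) s).toList = s.toList ++ (l.map String.toList).flatten := by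
  induction l generalizing s with
  | nil => simp
  | cons a r ih => simp [ih]

lemma join_empty_eq_foldl (l : List String) :
    PySem.Str.join "" l = l.foldl (fun a s => a ++ s) "" := by
  rw [← String.toList_inj]
  simp [PySem.Str.toList_join, chars_join_nil, foldl_append_toList]

lemma stringify_eq_foldl (diag : List String) :
    stringify diag = diag.foldl (fun a s => a ++ s) "" := by
  unfold stringify
  rw [PySem.List.foldl_pyRange_pyGetD diag "" (fun a s => a ++ s) "" (le_refl 0)]
  simp

lemma bucket_fold {α : Type} (cols i : Int) (hi : 0 ≤ i) (val : Int → α) :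
    ∀ (m : Nat) (c : List (List α)), c.length ≤ cols.toNat →
    (PySem.List.pyRange 0 (m : Int)).foldl
      (fun c col => if 0 ≤ col - i ∧ col - i < cols then
          c.set (col - i).toNat ((c.getD (col - i).toNat []) ++ [val (col)]) else c) c
    = c.mapIdx (fun d b => if i + (d : Int) < (m : Int) then b ++ [val (i + d)] else b) := by
  intro m
  induction m with
  | zero =>
    intro c hc
    rw [show PySem.List.pyRange 0 ((0:Nat):Int) = [] from by decide]
    simp only [List.foldl_nil]
    apply List.ext_getElem
    · simp
    · intro j h1 h2
      have : ¬ (i + (j:Int) < 0) := by omega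
      simp [List.getElem_mapIdx, this]
  | succ m ih =>
    intro c hc
    have hcast : ((m+1:Nat):Int) = (m:Int) + 1 := by push_cast; ring
    rw [hcast, PySem.List.pyRange_one_succ_right (by positivity), List.foldl_append, ih c hc]
    simp only [List.foldl_cons, List.foldl_nil]
    by_cases htouch : 0 ≤ (m:Int) - i ∧ (m:Int) - i < cols
    · rw [if_pos htouch]
      apply List.ext_getElem
      · simp
      · intro j h1 h2
        have hjlen : j < c.length := by simpa using h2
        have hjcols : (j:Int) < cols := by
          have := htouch.2
          omega
        rw [List.getElem_set]
        by_cases hj : ((m:Int) - i).toNat = j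
        · have him : i + (j:Int) = (m:Int) := by omega
          have hd0 : ((m:Int) - i).toNat < (c.mapIdx (fun d b => if i + (d : Int) < (m : Int) then b ++ [val (i + d)] else b)).length := by
            rw [List.length_mapIdx, hj]; exact hjlen
          rw [if_pos hj, List.getD_eq_getElem _ _ hd0]
          simp only [List.getElem_mapIdx]
          have h1' : ¬ (i + ((((m:Int) - i).toNat : Nat) : Int) < (m:Int)) := by omega
          have h2' : i + (j:Int) < (m:Int) + 1 := by omega
          rw [if_neg h1', if_pos h2']
          subst hj
          have hm : (m:Int) = i + ((((m:Int) - i).toNat : Nat) : Int) := by omega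
          rw [congrArg val hm]
        · rw [if_neg hj]
          simp only [List.getElem_mapIdx]
          have : (i + (j:Int) < (m:Int)) ↔ (i + (j:Int) < (m:Int) + 1) := by omega
          by_cases hlt : i + (j:Int) < (m:Int)
          · rw [if_pos hlt, if_pos (by omega)]
          · rw [if_neg hlt, if_neg (by omega)]
    · rw [if_neg htouch]
      apply List.ext_getElem
      · simp
      · intro j h1 h2
        have hjlen : j < c.length := by simpa using h1
        have hjcols : (j:Int) < cols := by
          have h3 : j < cols.toNat := lt_of_lt_of_le hjlen hc
          omega
        simp only [List.getElem_mapIdx]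
        have hne : i + (j:Int) ≠ (m:Int) := by
          intro he
          exact htouch ⟨by omega, by omega⟩
        by_cases hlt : i + (j:Int) < (m:Int)
        · rw [if_pos hlt, if_pos (by omega)]
        · rw [if_neg hlt, if_neg (by omega)]

lemma altRowStep_char (cols i : Int) (hi : 0 ≤ i) (row : List String)
    (c : List (List String)) (q : List (List (Int × Int)))
    (hc : c.length ≤ cols.toNat) (hq : q.length ≤ cols.toNat) :
    altRowStep cols (c, q) (i, row)
    = (c.mapIdx (fun d b => if i + (d : Int) < (row.length : Int)
                 then b ++ [PySem.List.pyGetD row (i + d) ""] else b),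
       q.mapIdx (fun d b => if i + (d : Int) < (row.length : Int)
                 then b ++ [(i + d + 1, i + 1)] else b)) := by
  unfold altRowStep
  have hstep : (fun (st : List (List String) × List (List (Int × Int))) (col : Int) =>
      let d := col - (i, row).1
      if 0 ≤ d ∧ d < cols then
        (st.1.set d.toNat (st.1.getD d.toNat [] ++ [PySem.List.pyGetD (i, row).2 col ""]),
         st.2.set d.toNat (st.2.getD d.toNat [] ++ [(col + 1, (i, row).1 + 1)]))
      else st)
    = (fun (st : List (List String) × List (List (Int × Int))) (col : Int) =>
      (if 0 ≤ col - i ∧ col - i < cols then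
          st.1.set (col - i).toNat ((st.1.getD (col - i).toNat []) ++ [PySem.List.pyGetD row col ""]) else st.1,
       if 0 ≤ col - i ∧ col - i < cols then
          st.2.set (col - i).toNat ((st.2.getD (col - i).toNat []) ++ [((col:Int) + 1, i + 1)]) else st.2)) := by
    funext st col
    dsimp only
    split_ifs with h
    · rfl
    · rfl
  rw [hstep]
  refine Eq.trans (PySem.List.foldl_prod_mk
    (fun c col => if 0 ≤ col - i ∧ col - i < cols then
        c.set (col - i).toNat ((c.getD (col - i).toNat []) ++ [PySem.List.pyGetD row col ""]) else c)
    (fun q col => if 0 ≤ col - i ∧ col - i < cols then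
        q.set (col - i).toNat ((q.getD (col - i).toNat []) ++ [((col:Int) + 1, i + 1)]) else q)
    (PySem.List.pyRange 0 (PySem.List.len (i, row).2)) c q) ?_
  have hlen : PySem.List.len (i, row).2 = ((row.length : Nat) : Int) := by
    simp [PySem.List.len_eq]
  rw [hlen, bucket_fold cols i hi _ row.length c hc, bucket_fold cols i hi _ row.length q hq]

lemma mapIdx_mapIdx {α β γ : Type} (l : List α) (f : Nat → α → β) (g : Nat → β → γ) :
    (l.mapIdx f).mapIdx g = l.mapIdx (fun d b => g d (f d b)) := by
  apply List.ext_getElem <;> simp [List.getElem_mapIdx]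

lemma outer_char (cols : Int) :
    ∀ (rows : List (List String)) (s : Int), 0 ≤ s →
    ∀ (c : List (List String)) (q : List (List (Int × Int))),
    c.length ≤ cols.toNat → q.length ≤ cols.toNat →
    (PySem.List.enumerate rows s).foldl (altRowStep cols) (c, q)
    = (c.mapIdx (fun d b => b ++ (PySem.List.enumerate rows s).filterMap
        (fun p => if 0 ≤ p.1 + (d : Int) ∧ p.1 + (d : Int) < PySem.List.len p.2
                  then some (PySem.List.pyGetD p.2 (p.1 + (d : Int)) "") else none)),
       q.mapIdx (fun d b => b ++ (PySem.List.enumerate rows s).filterMap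
        (fun p => if 0 ≤ p.1 + (d : Int) ∧ p.1 + (d : Int) < PySem.List.len p.2
                  then some (p.1 + (d : Int) + 1, p.1 + 1) else none))) := by
  intro rows
  induction rows with
  | nil =>
    intro s hs c q hc hq
    simp [PySem.List.enumerate]
    constructor <;> (apply List.ext_getElem <;> simp [List.getElem_mapIdx])
  | cons r rs ih =>
    intro s hs c q hc hq
    rw [PySem.List.enumerate_cons, List.foldl_cons,
        altRowStep_char cols s hs r c q hc hq,
        ih (s+1) (by omega) _ _ (by simpa using hc) (by simpa using hq),
        mapIdx_mapIdx, mapIdx_mapIdx]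
    refine Prod.ext ?_ ?_ <;>
    · show List.mapIdx _ _ = List.mapIdx _ _
      congr 1
      funext d b
      rw [List.filterMap_cons]
      dsimp only
      simp only [PySem.List.len_eq]
      by_cases hlt : s + (d:Int) < (r.length:Int)
      · rw [if_pos (show (0:Int) ≤ s + (d:Int) ∧ s + (d:Int) < (r.length:Int) from ⟨by omega, hlt⟩), if_pos hlt]
        simp
      · rw [if_neg (show ¬((0:Int) ≤ s + (d:Int) ∧ s + (d:Int) < (r.length:Int)) from fun h => hlt h.2), if_neg hlt]

lemma mapIdx_replicate_nil {β : Type} (n : Nat) (g : Nat → List β) :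
    (List.replicate n ([] : List β)).mapIdx (fun d b => b ++ g d) = (List.range n).map g := by
  apply List.ext_getElem <;> simp [List.getElem_mapIdx]

theorem methodOne_eq (array : List (List String)) : methodOne array = methodOne_alt array := by
  unfold methodOne methodOne_alt
  dsimp only
  have hcn : PySem.List.len (PySem.List.pyGetD array 0 [])
      = (((PySem.List.pyGetD array 0 []).length : Nat) : Int) := by
    simp [PySem.List.len_eq]
  have htn : (PySem.List.len (PySem.List.pyGetD array 0 [])).toNat
      = (PySem.List.pyGetD array 0 []).length := by
    rw [hcn]; simp
  rw [outer_char (PySem.List.len (PySem.List.pyGetD array 0 [])) array 0 (le_refl 0) _ _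
        (by simp) (by simp),
      mapIdx_replicate_nil, mapIdx_replicate_nil]
  refine Eq.trans (PySem.List.foldl_prod_mk
    (fun (b : List String) x => b ++ [stringify ((PySem.List.enumerate array 0).filterMap
        (fun p => if 0 ≤ p.1 + x ∧ p.1 + x < PySem.List.len p.2
                  then some (PySem.List.pyGetD p.2 (p.1 + x) "") else none))])
    (fun (ps : List (List (Int × Int))) x => ps ++ [(PySem.List.enumerate array 0).filterMap
        (fun p => if 0 ≤ p.1 + x ∧ p.1 + x < PySem.List.len p.2
                  then some (p.1 + x + 1, p.1 + 1) else none)])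
    (PySem.List.pyRange 0 (PySem.List.len (PySem.List.pyGetD array 0 []))) [] []) ?_
  rw [PySem.List.foldl_append_singleton_eq_map, PySem.List.foldl_append_singleton_eq_map]
  rw [hcn, PySem.List.pyRange_zero_natCast]
  simp only [Int.toNat_natCast]
  simp only [List.nil_append]
  refine Prod.ext ?_ ?_
  · dsimp only
    rw [List.map_map, List.map_map]
    apply List.map_congr_left
    intro k hk
    simp only [Function.comp_apply]
    rw [stringify_eq_foldl, join_empty_eq_foldl]
  · dsimp only
    rw [List.map_map]
    apply List.map_congr_left
    intro k hk
    simp only [Function.comp_apply]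

-- ===== VERDICT (by name: the statement is the Claim_ definition above) =====
theorem methodOne_spec : Claim_equal_methodOne := by
  intro array _ _
  unfold Spec_methodOne
  exact methodOne_eq array
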